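-- pv_equiv track=rewrite | github.com/qdriven/python-way | python-lessons/algorithm/interview/lint_junior/up_lowercase_convert.py | upcase_lowercase_convert
-- ===== SOURCE A (Python) =====
-- def upcase_lowercase_convert(input):
--     result=""
--     for i in range(len(input)):
--         if ord(input[i]) >= 97:
--             result=result+chr(ord(input[i]) - 32)
--         else:
--             result=result+input[i]
--     return result
-- ===== SOURCE B (Python) =====
-- def upcase_lowercase_convert(input):
--     table = {ord(c): ord(c) - 32 for c in set(input) if ord(c) >= 97}
--     return input.translate(table)
-- ===== Notes on version B (the rewrite author's own statement) =====
-- stated objective: idiomatic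
-- what changed: B builds a translation table over the distinct characters present (a dict keyed by code point) and applies str.translate in one pass, instead of A's per-character loop with repeated string concatenation.
import Mathlib
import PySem

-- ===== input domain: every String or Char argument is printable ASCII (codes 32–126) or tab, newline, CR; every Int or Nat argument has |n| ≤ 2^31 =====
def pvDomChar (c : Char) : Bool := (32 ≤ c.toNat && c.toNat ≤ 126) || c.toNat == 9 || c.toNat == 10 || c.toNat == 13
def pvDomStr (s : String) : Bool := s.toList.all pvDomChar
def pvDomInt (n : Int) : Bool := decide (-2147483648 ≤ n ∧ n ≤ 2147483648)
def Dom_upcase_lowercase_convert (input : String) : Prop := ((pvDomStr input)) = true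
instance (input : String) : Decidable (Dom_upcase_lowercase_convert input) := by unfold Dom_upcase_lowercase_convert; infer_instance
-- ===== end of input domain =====

-- B replaces A's per-character loop by a translation table over the distinct characters present, applied in one map (idiomatic; not measured faster).

-- ===== PORT A =====
def upcase_lowercase_convert (input : String) : String :=
  let cs := input.toList
  String.mk ((PySem.List.pyRange 0 (cs.length : Int) 1).foldl
    (fun result i =>
      let c := PySem.List.pyGetD cs i ' '
      if 97 ≤ c.toNat then result ++ [Char.ofNat (c.toNat - 32)]
      else result ++ [c]) [])

-- ===== PORT B =====
def upcase_lowercase_convert_alt (input : String) : String :=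
  let table : PySem.Dict Nat Nat :=
    (PySem.Set.ofList input.toList).foldl
      (fun d c => if 97 ≤ c.toNat then d.insert c.toNat (c.toNat - 32) else d)
      PySem.Dict.empty
  String.mk (input.toList.map (fun c =>
    match table.get? c.toNat with
    | some n => Char.ofNat n
    | none => c))

-- ===== PRECONDITION & SPEC =====
def Spec_upcase_lowercase_convert (input : String) (out : String) : Prop := out = upcase_lowercase_convert_alt input
instance (input : String) (out : String) : Decidable (Spec_upcase_lowercase_convert input out) := by unfold Spec_upcase_lowercase_convert; infer_instance

-- ===== CLAIM (what is proved, stated in full; the proofs are below) =====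
def Claim_equal_upcase_lowercase_convert : Prop := ∀ (input : String), Dom_upcase_lowercase_convert input → Spec_upcase_lowercase_convert input (upcase_lowercase_convert input)

-- ===== LEMMAS AND PROOFS =====

-- what the table-building fold answers: some (k-32) exactly for keys 97 ≤ k coming from S
lemma pv_table_get (S : List Char) (d : PySem.Dict Nat Nat) (k : Nat) :
    (S.foldl (fun d c => if 97 ≤ c.toNat then d.insert c.toNat (c.toNat - 32) else d) d).get? k
      = if 97 ≤ k ∧ ∃ c ∈ S, c.toNat = k then some (k - 32) else d.get? k := by
  induction S generalizing d with
  | nil => simp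
  | cons c S ih =>
    rw [List.foldl_cons]
    by_cases hc : 97 ≤ c.toNat
    · rw [if_pos hc, ih]
      by_cases hk2 : 97 ≤ k ∧ ∃ c' ∈ S, c'.toNat = k
      · rw [if_pos hk2,
          if_pos ⟨hk2.1, hk2.2.imp (fun c' h => ⟨List.mem_cons_of_mem _ h.1, h.2⟩)⟩]
      · rw [if_neg hk2, PySem.Dict.get?_insert]
        by_cases hkc : k = c.toNat
        · rw [if_pos hkc, if_pos ⟨by rw [hkc]; exact hc, c, List.mem_cons_self, hkc.symm⟩, hkc]
        · rw [if_neg hkc, if_neg]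
          rintro ⟨h1, c', hmem, hv⟩
          rcases List.mem_cons.mp hmem with rfl | hm
          · exact hkc hv.symm
          · exact hk2 ⟨h1, c', hm, hv⟩
    · rw [if_neg hc, ih]
      by_cases hk2 : 97 ≤ k ∧ ∃ c' ∈ S, c'.toNat = k
      · rw [if_pos hk2,
          if_pos ⟨hk2.1, hk2.2.imp (fun c' h => ⟨List.mem_cons_of_mem _ h.1, h.2⟩)⟩]
      · rw [if_neg hk2, if_neg]
        rintro ⟨h1, c', hmem, hv⟩
        rcases List.mem_cons.mp hmem with rfl | hm
        · exact hc (hv ▸ h1)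
        · exact hk2 ⟨h1, c', hm, hv⟩

-- ===== VERDICT (by name: the statement is the Claim_ definition above) =====
theorem upcase_lowercase_convert_spec : Claim_equal_upcase_lowercase_convert := by
  intro input _
  unfold Spec_upcase_lowercase_convert upcase_lowercase_convert upcase_lowercase_convert_alt
  dsimp only
  rw [PySem.List.foldl_pyRange_zero_pyGetD' input.toList ' '
      (fun result c => if 97 ≤ c.toNat then result ++ [Char.ofNat (c.toNat - 32)] else result ++ [c])]
  rw [show (fun (result : List Char) (c : Char) =>
        if 97 ≤ c.toNat then result ++ [Char.ofNat (c.toNat - 32)] else result ++ [c])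
      = fun result c => result ++ [if 97 ≤ c.toNat then Char.ofNat (c.toNat - 32) else c] from by
    funext r c; split <;> rfl]
  rw [PySem.List.foldl_append_singleton_eq_map, List.nil_append]
  congr 1
  apply List.map_congr_left
  intro c hc
  rw [pv_table_get]
  by_cases h : 97 ≤ c.toNat
  · have hmem : 97 ≤ c.toNat ∧ ∃ c' ∈ PySem.Set.ofList input.toList, c'.toNat = c.toNat :=
      ⟨h, c, (PySem.Set.mem_ofList _ _).mpr hc, rfl⟩
    rw [if_pos h, if_pos hmem]
  · have hmem : ¬(97 ≤ c.toNat ∧ ∃ c' ∈ PySem.Set.ofList input.toList, c'.toNat = c.toNat) :=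
      fun hh => h hh.1
    rw [if_neg h, if_neg hmem, PySem.Dict.get?_empty]
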